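-- pv_equiv track=rewrite | github.com/Siddeequa/Projects | Python/Scrabble_kinda/normal.py | isValidWord
-- ===== SOURCE A (Python) =====
-- def isValidWord(word, hand, wordList):
--     """
--     Returns True if word is in the wordList and is entirely
--     composed of letters in the hand. Otherwise, returns False.
--
--     Does not mutate hand or wordList.
--
--     word: string
--     hand: dictionary (string -> int)
--     wordList: list of lowercase strings
--     """
--     # Create a copy of hand
--     hand_copy = hand.copy()
--     # Get letters present in hand (irrespective of number of times they occur)
--     letters_present = hand_copy.keys()
--
--     # Check if word is in wordlist first
--     if word in wordList:
--         # Iterate over each letter to check if letter is in hand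
--         for letter in word:
--             if letter in letters_present:
--                 if hand_copy[letter] != 0: # Check if letter has not already been used up
--                     hand_copy[letter] -= 1
--                     continue # Check next letter
--                 else:
--                     return False # If letter is being overused
--             else:
--                 return False # If letter is not in dict keys
--         return True # If both in wordlist & keys
--     else:
--         return False # If word is not in wordlist
-- ===== SOURCE B (Python) =====
-- def isValidWord(word, hand, wordList):
--     """True iff word is in wordList and the hand has enough of every letter.
--     Builds a frequency table of the word once, then checks each distinct
--     letter's required count against the hand in one aggregate pass.
--     Does not mutate hand or wordList."""
--     if word not in wordList:
--         return False
--     need = {}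
--     for c in word:
--         need[c] = need.get(c, 0) + 1
--     return all(hand.get(c, 0) >= n for c, n in need.items())
-- ===== Notes on version B (the rewrite author's own statement) =====
-- stated objective: idiomatic
-- what changed: B builds a frequency table of the word once and checks each distinct letter's required count against the hand in one aggregate pass, instead of copying the hand and walking every character while decrementing a mutable copy.
-- intended difference: On inputs where word is in wordList, every letter of word is a hand key, the hand supply suffices for every letter except that some used letter has a NEGATIVE hand count, A returns True (its '!= 0' test treats a negative count as unlimited supply) while B returns False, which is intended since a hand cannot supply more copies than its count. — e.g. on isValidWord("a", [("a", -1)], ["a"]): A returns true, B returns false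
import Mathlib
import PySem

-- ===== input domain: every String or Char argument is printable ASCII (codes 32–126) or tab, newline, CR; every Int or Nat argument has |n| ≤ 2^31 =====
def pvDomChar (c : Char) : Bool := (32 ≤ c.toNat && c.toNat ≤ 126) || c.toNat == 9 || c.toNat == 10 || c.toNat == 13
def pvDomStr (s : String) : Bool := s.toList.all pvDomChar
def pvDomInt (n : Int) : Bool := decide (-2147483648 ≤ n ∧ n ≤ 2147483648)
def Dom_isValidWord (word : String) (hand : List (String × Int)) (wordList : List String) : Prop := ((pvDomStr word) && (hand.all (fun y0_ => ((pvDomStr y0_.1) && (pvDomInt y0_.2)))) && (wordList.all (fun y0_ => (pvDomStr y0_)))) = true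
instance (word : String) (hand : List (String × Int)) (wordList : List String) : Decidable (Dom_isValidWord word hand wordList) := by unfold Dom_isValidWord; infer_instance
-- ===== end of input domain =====

-- B replaces A's mutate-a-hand-copy walk by a one-shot frequency table of the word checked
-- against the hand in one aggregate pass (idiomatic; same cost); on hands with a negative
-- count for a used letter the two differ — see D_isValidWord below.

-- ===== PORT A =====
-- the 'for letter in word' loop over the mutable copy hand_copy
def isValidWordLoop (letters : List Char) (hand_copy : PySem.Dict String Int) : Bool :=
  match letters with
  | [] => true                                  -- loop finished: return True
  | letter :: rest =>
    match hand_copy.get? letter.toString with   -- 'if letter in letters_present' + 'hand_copy[letter]'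
    | some v =>
      if v ≠ 0 then
        isValidWordLoop rest (hand_copy.insert letter.toString (v - 1))  -- hand_copy[letter] -= 1; continue
      else false                                -- letter used up
    | none => false                             -- letter not in dict keys

def isValidWord (word : String) (hand : List (String × Int)) (wordList : List String) : Bool :=
  let hand_copy := PySem.Dict.mk hand           -- hand.copy()
  if wordList.contains word then                -- if word in wordList
    isValidWordLoop word.toList hand_copy
  else false

-- ===== PORT B =====
def isValidWord_alt (word : String) (hand : List (String × Int)) (wordList : List String) : Bool :=
  if ¬ (wordList.contains word) then false      -- if word not in wordList: return False
  else
    -- need = {}; for c in word: need[c] = need.get(c, 0) + 1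
    let need := word.toList.foldl
      (fun d c => d.insert c.toString (d.getD c.toString 0 + 1)) PySem.Dict.empty
    -- all(hand.get(c, 0) >= n for c, n in need.items())
    need.items.all (fun p => (PySem.Dict.mk hand).getD p.1 0 ≥ p.2)

-- ===== PRECONDITION & SPEC =====
-- On inputs where word is in wordList, every letter of word is a hand key and the hand
-- suffices for every letter except that some used letter has a NEGATIVE hand count,
-- A returns True (its '!= 0' test treats a negative count as unlimited supply) while B
-- returns False, which is intended: a hand cannot supply more copies than its count.
def D_isValidWord (word : String) (hand : List (String × Int)) (wordList : List String) : Prop :=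
  word ∈ wordList ∧
  (∀ c ∈ word.toList, ((PySem.Dict.mk hand).get? c.toString).isSome = true ∧
      ((PySem.Dict.mk hand).getD c.toString 0 < 0 ∨
        ((word.toList.count c : Int) ≤ (PySem.Dict.mk hand).getD c.toString 0))) ∧
  (∃ c ∈ word.toList, (PySem.Dict.mk hand).getD c.toString 0 < 0)
instance (word : String) (hand : List (String × Int)) (wordList : List String) : Decidable (D_isValidWord word hand wordList) := by unfold D_isValidWord; infer_instance

def Spec_isValidWord (word : String) (hand : List (String × Int)) (wordList : List String) (out : Bool) : Prop := ¬ D_isValidWord word hand wordList → out = isValidWord_alt word hand wordList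
instance (word : String) (hand : List (String × Int)) (wordList : List String) (out : Bool) : Decidable (Spec_isValidWord word hand wordList out) := by unfold Spec_isValidWord; infer_instance

def pvDiffWitness_isValidWord : String × (List (String × Int)) × List String :=
  ("a", [("a", -1)], ["a"])
def pvDiffWitnessOut_isValidWord : Bool × Bool := (true, false)

-- ===== CLAIM (what is proved, stated in full; the proofs are below) =====
def Claim_unchanged_isValidWord : Prop := ∀ (word : String) (hand : List (String × Int)) (wordList : List String), Dom_isValidWord word hand wordList → Spec_isValidWord word hand wordList (isValidWord word hand wordList)
def Claim_changed_isValidWord : Prop := Dom_isValidWord (pvDiffWitness_isValidWord.1) (pvDiffWitness_isValidWord.2.1) (pvDiffWitness_isValidWord.2.2) ∧ D_isValidWord (pvDiffWitness_isValidWord.1) (pvDiffWitness_isValidWord.2.1) (pvDiffWitness_isValidWord.2.2) ∧ isValidWord (pvDiffWitness_isValidWord.1) (pvDiffWitness_isValidWord.2.1) (pvDiffWitness_isValidWord.2.2) = pvDiffWitnessOut_isValidWord.1 ∧ isValidWord_alt (pvDiffWitness_isValidWord.1) (pvDiffWitness_isValidWord.2.1) (pvDiffWitness_isValidWord.2.2)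 = pvDiffWitnessOut_isValidWord.2 ∧ pvDiffWitnessOut_isValidWord.1 ≠ pvDiffWitnessOut_isValidWord.2
def Claim_exact_isValidWord : Prop := ∀ (word : String) (hand : List (String × Int)) (wordList : List String), Dom_isValidWord word hand wordList → D_isValidWord word hand wordList → isValidWord word hand wordList ≠ isValidWord_alt word hand wordList

-- ===== LEMMAS AND PROOFS =====

theorem contains_true_iff (l : List String) (w : String) : l.contains w = true ↔ w ∈ l := by
  simp

theorem charToString_inj : Function.Injective Char.toString := by
  intro a b h
  have h2 : a.toString.toList = b.toString.toList := by rw [h]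
  simpa using h2

-- A's loop succeeds iff every letter is present and its count is negative or large enough.
theorem loopA_iff (l : List Char) (d : PySem.Dict String Int) :
    isValidWordLoop l d = true ↔
      ∀ c ∈ l, ∃ v, d.get? c.toString = some v ∧ (v < 0 ∨ (l.count c : Int) ≤ v) := by
  induction l generalizing d with
  | nil => simp [isValidWordLoop]
  | cons a rest ih =>
    rw [isValidWordLoop]
    cases hget : d.get? a.toString with
    | none =>
      simp only [Bool.false_eq_true, false_iff]
      intro h
      obtain ⟨v, hv, _⟩ := h a (List.mem_cons_self ..)
      rw [hget] at hv
      exact absurd hv (by simp)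
    | some v =>
      by_cases hv0 : v = 0
      · subst hv0
        simp only [ne_eq, not_true_eq_false, if_false, Bool.false_eq_true, false_iff]
        intro h
        obtain ⟨w, hw, hcond⟩ := h a (List.mem_cons_self ..)
        rw [hget] at hw
        obtain rfl : (0 : Int) = w := Option.some.inj hw
        
        have hcnt : 1 ≤ rest.count a + 1 := by omega
        rcases hcond with h1 | h1
        · omega
        · simp only [List.count_cons_self] at h1
          omega
      · simp only [ne_eq, hv0, not_false_eq_true, if_true]
        rw [ih]
        constructor
        · intro h c hc
          by_cases hca : c = a
          · subst hca
            refine ⟨v, hget, ?_⟩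
            by_cases hmem : c ∈ rest
            · obtain ⟨u, hu, hcond⟩ := h c hmem
              rw [PySem.Dict.get?_insert_self] at hu
              obtain rfl : v - 1 = u := Option.some.inj hu
              simp only [List.count_cons_self]
              push_cast
              rcases hcond with h1 | h1
              · left; omega
              · right; omega
            · have : rest.count c = 0 := List.count_eq_zero.mpr hmem
              simp only [List.count_cons_self, this]
              rcases lt_or_gt_of_ne hv0 with h1 | h1
              · left; exact h1
              · right; omega
          · have hmem : c ∈ rest := by
              rcases List.mem_cons.mp hc with h1 | h1
              · exact absurd h1 hca
              · exact h1
            obtain ⟨u, hu, hcond⟩ := h c hmem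
            rw [PySem.Dict.get?_insert_of_ne _ _ (fun he => hca (charToString_inj he))] at hu
            refine ⟨u, hu, ?_⟩
            have hac : a ≠ c := fun h => hca h.symm
            have hcc : (a :: rest).count c = rest.count c := by
              simp [hac]
            omega
        · intro h c hc
          by_cases hca : c = a
          · subst hca
            refine ⟨v - 1, PySem.Dict.get?_insert_self .., ?_⟩
            obtain ⟨u, hu, hcond⟩ := h c (by simp)
            rw [hget] at hu
            obtain rfl : v = u := Option.some.inj hu
            simp only [List.count_cons_self] at hcond
            push_cast at hcond
            rcases hcond with h1 | h1
            · left; omega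
            · right; omega
          · obtain ⟨u, hu, hcond⟩ := h c (List.mem_cons_of_mem _ hc)
            refine ⟨u, ?_, ?_⟩
            · rw [PySem.Dict.get?_insert_of_ne _ _ (fun he => hca (charToString_inj he))]
              exact hu
            · have hac : a ≠ c := fun h => hca h.symm
              have hcc : (a :: rest).count c = rest.count c := by
                simp [hac]
              omega

theorem A_iff (word : String) (hand : List (String × Int)) (wordList : List String) :
    isValidWord word hand wordList = true ↔
      word ∈ wordList ∧ ∀ c ∈ word.toList, ∃ v, (PySem.Dict.mk hand).get? c.toString = some v ∧
        (v < 0 ∨ (word.toList.count c : Int) ≤ v) := by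
  unfold isValidWord
  by_cases hmem : wordList.contains word
  · rw [if_pos hmem, loopA_iff]
    simp [(contains_true_iff _ _).mp hmem]
  · rw [if_neg hmem]
    simp only [Bool.false_eq_true, false_iff, not_and]
    intro h
    exact fun _ => hmem ((contains_true_iff _ _).mpr h)

theorem B_iff (word : String) (hand : List (String × Int)) (wordList : List String) :
    isValidWord_alt word hand wordList = true ↔
      word ∈ wordList ∧ ∀ c ∈ word.toList,
        (word.toList.count c : Int) ≤ (PySem.Dict.mk hand).getD c.toString 0 := by
  unfold isValidWord_alt
  by_cases hmem : wordList.contains word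
  · rw [if_neg (not_not_intro hmem)]
    have hfold : word.toList.foldl
        (fun d c => d.insert c.toString (d.getD c.toString 0 + 1)) PySem.Dict.empty
        = PySem.Dict.counter (word.toList.map Char.toString) := by
      rw [← PySem.Dict.foldl_insert_getD_add_one_eq_counter, List.foldl_map]
    rw [hfold, List.all_eq_true]
    simp only [PySem.Dict.items_counter, List.mem_map, decide_eq_true_eq, ge_iff_le]
    constructor
    · intro h
      refine ⟨(contains_true_iff _ _).mp hmem, fun c hc => ?_⟩
      have hk : c.toString ∈ PySem.Set.ofList (word.toList.map Char.toString) :=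
        (PySem.Set.mem_ofList _ _).mpr (List.mem_map_of_mem hc)
      have hcm : (word.toList.map Char.toString).count c.toString = word.toList.count c := by
        rw [List.count_map_of_injective]
        exact charToString_inj
      have h2 := h (c.toString, ((word.toList.map Char.toString).count c.toString : Int))
        ⟨c.toString, hk, rfl⟩
      rw [hcm] at h2
      exact h2
    · rintro ⟨_, h⟩ p ⟨k, hk, rfl⟩
      obtain ⟨c, hc, rfl⟩ := List.mem_map.mp ((PySem.Set.mem_ofList _ _).mp hk)
      have hcm : (word.toList.map Char.toString).count c.toString = word.toList.count c := by
        rw [List.count_map_of_injective]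
        exact charToString_inj
      show ((word.toList.map Char.toString).count c.toString : Int) ≤ _
      rw [hcm]
      exact h c hc
  · rw [if_pos hmem]
    simp only [Bool.false_eq_true, false_iff, not_and]
    intro h
    exact fun _ => hmem ((contains_true_iff _ _).mpr h)

-- B true implies A true (enough supply in particular means present and not negative-blocked).
theorem B_implies_A (word : String) (hand : List (String × Int)) (wordList : List String)
    (h : isValidWord_alt word hand wordList = true) : isValidWord word hand wordList = true := by
  rw [B_iff] at h
  rw [A_iff]
  refine ⟨h.1, fun c hc => ?_⟩
  have hcnt : 1 ≤ word.toList.count c := List.count_pos_iff.mpr hc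
  have hle := h.2 c hc
  cases hget : (PySem.Dict.mk hand).get? c.toString with
  | none =>
    rw [PySem.Dict.getD_eq_get?_getD, hget] at hle
    simp only [Option.getD_none] at hle
    omega
  | some v =>
    rw [PySem.Dict.getD_eq_get?_getD, hget] at hle
    exact ⟨v, rfl, Or.inr hle⟩

-- ===== VERDICT (by name: the statement is the Claim_ definition above) =====
theorem isValidWord_spec : Claim_unchanged_isValidWord := by
  intro word hand wordList _ hnd
  by_cases hB : isValidWord_alt word hand wordList = true
  · rw [hB, B_implies_A _ _ _ hB]
  · by_cases hA : isValidWord word hand wordList = true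
    · exfalso
      apply hnd
      rw [A_iff] at hA
      rw [B_iff] at hB
      push Not at hB
      obtain ⟨c0, hc0, hlt⟩ := hB hA.1
      refine ⟨hA.1, fun c hc => ?_, ⟨c0, hc0, ?_⟩⟩
      · obtain ⟨v, hv, hcond⟩ := hA.2 c hc
        refine ⟨by rw [hv]; rfl, ?_⟩
        rw [PySem.Dict.getD_eq_get?_getD, hv]
        simpa using hcond
      · obtain ⟨v, hv, hcond⟩ := hA.2 c0 hc0
        rw [PySem.Dict.getD_eq_get?_getD, hv] at hlt ⊢
        simp only [Option.getD_some] at hlt ⊢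
        rcases hcond with h1 | h1
        · exact h1
        · omega
    · rw [Bool.not_eq_true] at hA hB
      rw [hA, hB]

theorem isValidWord_changed : Claim_changed_isValidWord := by
  unfold Claim_changed_isValidWord
  refine ⟨by decide, ?_, by decide, by decide, by decide⟩
  show D_isValidWord "a" [("a", -1)] ["a"]
  unfold D_isValidWord
  refine ⟨by decide, ?_, ⟨'a', by decide, by decide⟩⟩
  rw [show ("a" : String).toList = ['a'] by decide, List.forall_mem_singleton]
  decide

theorem isValidWord_tight : Claim_exact_isValidWord := by
  intro word hand wordList _ hd heq
  obtain ⟨hmem, hall, c0, hc0, hneg⟩ := hd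
  have hA : isValidWord word hand wordList = true := by
    rw [A_iff]
    refine ⟨hmem, fun c hc => ?_⟩
    obtain ⟨hsome, hcond⟩ := hall c hc
    cases hget : (PySem.Dict.mk hand).get? c.toString with
    | none => rw [hget] at hsome; simp at hsome
    | some v =>
      rw [PySem.Dict.getD_eq_get?_getD, hget] at hcond
      exact ⟨v, rfl, by simpa using hcond⟩
  have hB : isValidWord_alt word hand wordList ≠ true := by
    intro hx
    rw [B_iff] at hx
    obtain ⟨_, h⟩ := hx
    have hcnt : 1 ≤ word.toList.count c0 := List.count_pos_iff.mpr hc0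
    have := h c0 hc0
    omega
  rw [hA] at heq
  exact hB heq.symm
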